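-- pv_equiv track=rewrite | github.com/CSSLab/maia2-skill-adaptation | test/get_self_implemented_concepts.py | is_piece_on_square
-- ===== SOURCE A (Python) =====
-- def is_piece_on_square(piece: str, square: int, pos: str) -> int:
--     # Ensure the square is in the valid range
--     if square < 0 or square > 63:
--         raise ValueError("Square must be an integer between 0 and 63.")
--
--     # Convert the square integer into corresponding rank and file
--     rank_idx = square // 8  # rank is determined by dividing by 8
--     file_idx = square % 8  # file is determined by the remainder when dividing by 8
--
--     # Split the FEN into board configuration (the first part)
--     board_fen = pos.split()[0]
--
--     # Convert the FEN into a 2D board array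
--     board = []
--     for row in board_fen.split('/'):
--         board_row = []
--         for char in row:
--             if char.isdigit():
--                 board_row.extend(['.'] * int(char))  # empty squares as '.'
--             else:
--                 board_row.append(char)
--         board.append(board_row)
--
--     return int(board[rank_idx][file_idx] == piece)
-- ===== SOURCE B (Python) =====
-- def is_piece_on_square(piece: str, square: int, pos: str) -> int:
--     # Decode just the one relevant FEN rank with a single left-to-right scan,
--     # counting down the remaining file offset; no 8x8 board is built.
--     if square < 0 or square > 63:
--         raise ValueError("Square must be an integer between 0 and 63.")
--     row = pos.split()[0].split('/')[square // 8]
--     file = square % 8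
--     for char in row:
--         width = int(char) if char.isdigit() else 1
--         if file < width:
--             target = '.' if char.isdigit() else char
--             return int(target == piece)
--         file -= width
--     return 0
-- ===== Notes on version B (the rewrite author's own statement) =====
-- stated objective: alternative
-- what changed: B replaces A's construction of the full 8x8 board (expanding every FEN rank into a 2D array) by a single early-terminating left-to-right scan of only the one relevant rank, counting down the remaining file offset; Pre_ excludes exactly the inputs where A raises (square out of 0..63, empty FEN, missing rank row, or a rank row too short to reach the file).
import Mathlib
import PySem

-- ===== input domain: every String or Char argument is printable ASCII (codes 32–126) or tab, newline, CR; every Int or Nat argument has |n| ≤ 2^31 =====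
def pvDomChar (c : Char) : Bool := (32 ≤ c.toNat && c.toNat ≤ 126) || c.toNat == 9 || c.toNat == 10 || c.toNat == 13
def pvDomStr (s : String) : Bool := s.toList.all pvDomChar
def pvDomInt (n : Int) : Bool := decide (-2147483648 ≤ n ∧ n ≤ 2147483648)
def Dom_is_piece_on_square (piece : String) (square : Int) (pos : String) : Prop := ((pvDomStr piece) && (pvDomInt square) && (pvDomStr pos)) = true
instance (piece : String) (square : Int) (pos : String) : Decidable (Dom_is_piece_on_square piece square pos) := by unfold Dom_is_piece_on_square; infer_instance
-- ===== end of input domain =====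

-- B scans only the one relevant FEN rank, counting down the remaining file offset, instead of building the whole 8x8 board; return-value equivalence on Pre_ (where Python A returns).

-- ===== PORT A =====
-- one row of the FEN expanded into board squares ('.' for empty), as A's inner loop builds it
def pvExpandRow (row : List Char) : List Char :=
  row.foldl (fun br c => if PySem.Chars.isdigit c then br ++ List.replicate (c.toNat - 48) '.' else br ++ [c]) []

def is_piece_on_square (piece : String) (square : Int) (pos : String) : Int :=
  if square < 0 ∨ square > 63 then 0  -- Python raises ValueError here (outside Pre_)
  else
    -- rank_idx = square // 8, file_idx = square % 8
    match PySem.List.pyGet? (PySem.Str.split₀ pos) 0 with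
    | none => 0  -- IndexError (outside Pre_)
    | some board_fen =>
      match PySem.List.pyGet? ((PySem.Chars.splitOn board_fen.toList ['/']).foldl
        (fun b row => b ++ [pvExpandRow row]) []) (PySem.Int.floordiv square 8) with
      | none => 0  -- IndexError (outside Pre_)
      | some r =>
        match PySem.List.pyGet? r (PySem.Int.mod square 8) with
        | none => 0  -- IndexError (outside Pre_)
        | some c => if String.singleton c == piece then 1 else 0

-- ===== PORT B =====
-- B's scanner: walk the rank left to right, counting down the remaining file offset
def pvScanRow (piece : String) : List Char → Int → Int
  | [], _ => 0
  | c :: cs, file =>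
    let width : Int := if PySem.Chars.isdigit c then ((c.toNat - 48 : Nat) : Int) else 1
    if file < width then
      (if (if PySem.Chars.isdigit c then "." else String.singleton c) == piece then 1 else 0)
    else pvScanRow piece cs (file - width)

def is_piece_on_square_alt (piece : String) (square : Int) (pos : String) : Int :=
  if square < 0 ∨ square > 63 then 0  -- ValueError (outside Pre_)
  else
    match PySem.List.pyGet? (PySem.Str.split₀ pos) 0 with
    | none => 0  -- IndexError (outside Pre_)
    | some board_fen =>
      match PySem.List.pyGet? (PySem.Chars.splitOn board_fen.toList ['/']) (PySem.Int.floordiv square 8) with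
      | none => 0  -- IndexError (outside Pre_)
      | some row => pvScanRow piece row (PySem.Int.mod square 8)

-- ===== PRECONDITION & SPEC =====
-- the expanded width of a FEN rank row (a digit counts as that many empty squares)
def pvRowWidth (row : List Char) : Int :=
  (row.map (fun c => if PySem.Chars.isdigit c then ((c.toNat - 48 : Nat) : Int) else 1)).sum

-- the FEN row (as characters) that A's board[rank_idx] is built from, if it exists
def pvRowAt (square : Int) (pos : String) : Option (List Char) :=
  (PySem.List.pyGet? (PySem.Str.split₀ pos) 0).bind
    (fun bf => PySem.List.pyGet? (PySem.Chars.splitOn bf.toList ['/']) (PySem.Int.floordiv square 8))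

-- Pre_: exactly where Python A returns — square in 0..63, pos has a first whitespace-separated
-- token, that token's '/'-split has a row at rank_idx, and that row's expanded width exceeds file_idx.
def Pre_is_piece_on_square (piece : String) (square : Int) (pos : String) : Prop :=
  0 ≤ square ∧ square ≤ 63 ∧
  ((pvRowAt square pos).any (fun row => decide (PySem.Int.mod square 8 < pvRowWidth row))) = true

instance (piece : String) (square : Int) (pos : String) : Decidable (Pre_is_piece_on_square piece square pos) := by
  unfold Pre_is_piece_on_square; infer_instance

def pvWitness_is_piece_on_square : String × Int × String :=
  ("p", 8, "rnbqkbnr/pppppppp/8/8/8/8/PPPPPPPP/RNBQKBNR w KQkq - 0 1")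

def Spec_is_piece_on_square (piece : String) (square : Int) (pos : String) (out : Int) : Prop := out = is_piece_on_square_alt piece square pos
instance (piece : String) (square : Int) (pos : String) (out : Int) : Decidable (Spec_is_piece_on_square piece square pos out) := by unfold Spec_is_piece_on_square; infer_instance

-- ===== CLAIM (what is proved, stated in full; the proofs are below) =====
def Claim_equal_is_piece_on_square : Prop := ∀ (piece : String) (square : Int) (pos : String), Dom_is_piece_on_square piece square pos → Pre_is_piece_on_square piece square pos → Spec_is_piece_on_square piece square pos (is_piece_on_square piece square pos)


-- ===== LEMMAS AND PROOFS =====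

-- A's row expansion is a flatMap
theorem pvExpandRow_eq_flatMap (row : List Char) :
    pvExpandRow row = row.flatMap (fun c => if PySem.Chars.isdigit c then List.replicate (c.toNat - 48) '.' else [c]) := by
  unfold pvExpandRow
  have hbody : (fun (br : List Char) (c : Char) => if PySem.Chars.isdigit c then br ++ List.replicate (c.toNat - 48) '.' else br ++ [c])
      = fun br c => br ++ (if PySem.Chars.isdigit c then List.replicate (c.toNat - 48) '.' else [c]) := by
    funext br c; split <;> rfl
  rw [hbody, PySem.List.foldl_append_eq_flatMap]
  simp

-- B's countdown scan at offset k reads exactly the k-th square of A's expansion of the row (0 when out of range)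
theorem pvScan_eq_expand (piece : String) (row : List Char) (k : Int) (hk : 0 ≤ k) :
    pvScanRow piece row k
      = (match PySem.List.pyGet? (pvExpandRow row) k with
         | none => (0 : Int)
         | some c => if String.singleton c == piece then 1 else 0) := by
  induction row generalizing k with
  | nil =>
    simp [pvScanRow, pvExpandRow, PySem.List.pyGet?_of_nonneg _ hk]
  | cons c cs ih =>
    rw [pvExpandRow_eq_flatMap, List.flatMap_cons, ← pvExpandRow_eq_flatMap]
    rw [PySem.List.pyGet?_of_nonneg _ hk]
    by_cases hd : PySem.Chars.isdigit c
    · simp only [pvScanRow, hd, if_true]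
      set v : Nat := c.toNat - 48 with hv
      by_cases hin : k < (v : Int)
      · rw [if_pos hin]
        have hlt : k.toNat < v := by omega
        rw [List.getElem?_append_left (by simpa using hlt)]
        simp [hlt, show String.singleton '.' = "." from rfl]
      · rw [if_neg hin]
        have hidx : k.toNat = v + (k - v).toNat := by omega
        rw [ih (k - v) (by omega), PySem.List.pyGet?_of_nonneg _ (by omega : (0:Int) ≤ k - v)]
        rw [hidx, List.getElem?_append_right (by simp)]
        simp
    · rw [Bool.not_eq_true] at hd
      simp only [pvScanRow, hd, Bool.false_eq_true, if_false]
      by_cases h0 : k < 1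
      · rw [if_pos h0]
        have : k.toNat = 0 := by omega
        simp [this]
      · rw [if_neg h0]
        have hidx : k.toNat = (k - 1).toNat + 1 := by omega
        rw [ih (k - 1) (by omega), PySem.List.pyGet?_of_nonneg _ (by omega : (0:Int) ≤ k - 1)]
        rw [hidx]
        simp

-- ===== VERDICT (by name: the statement is the Claim_ definition above) =====
theorem is_piece_on_square_spec : Claim_equal_is_piece_on_square := by
  intro piece square pos _ hpre
  unfold Spec_is_piece_on_square is_piece_on_square is_piece_on_square_alt
  obtain ⟨h0, h63, _⟩ := hpre
  rw [if_neg (by omega), if_neg (by omega)]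
  cases hbf : PySem.List.pyGet? (PySem.Str.split₀ pos) 0 with
  | none => rfl
  | some board_fen =>
    dsimp only
    rw [show (List.foldl (fun b row => b ++ [pvExpandRow row]) []
          (PySem.Chars.splitOn board_fen.toList ['/']))
        = (PySem.Chars.splitOn board_fen.toList ['/']).map pvExpandRow from by
      rw [PySem.List.foldl_append_singleton_eq_map]; simp]
    have hm0 : (0:Int) ≤ PySem.Int.mod square 8 := PySem.Int.mod_nonneg _ (by norm_num)
    have hfd : (0:Int) ≤ PySem.Int.floordiv square 8 := by
      rw [PySem.Int.floordiv_eq_ediv_of_pos (by norm_num)]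
      exact Int.ediv_nonneg h0 (by norm_num)
    rw [PySem.List.pyGet?_of_nonneg _ hfd, PySem.List.pyGet?_of_nonneg _ hfd, List.getElem?_map]
    cases hrow : (PySem.Chars.splitOn board_fen.toList ['/'])[(PySem.Int.floordiv square 8).toNat]? with
    | none => rfl
    | some row =>
      dsimp only
      simp only [Option.map_some]
      exact (pvScan_eq_expand piece row _ hm0).symm
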